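-- pv_equiv track=rewrite | github.com/PedroMends30/atv_ii_projeto_de_algoritmos | no_prefix_set.py | noPrefixSet
-- ===== SOURCE A (Python) =====
-- def noPrefixSet(words):
--     trie = {}
--     for word in words:
--         current = trie
--         for letter in word:
--             if '_end_' in current:
--                 return False, word
--             current = current.setdefault(letter, {})
--         if current:
--             return False, word
--         current['_end_'] = True
--     return True, None
-- ===== SOURCE B (Python) =====
-- def noPrefixSet(words):
--     seen = []
--     for word in words:
--         if any(word.startswith(e) or e.startswith(word) for e in seen):
--             return False, word
--         seen.append(word)
--     return True, None
-- ===== Notes on version B (the rewrite author's own statement) =====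
-- stated objective: simpler
-- what changed: B drops A's mutable trie entirely and instead keeps a flat list of already-accepted words, rejecting the current word on the first earlier word that is a prefix of it or that it is a prefix of.
import Mathlib
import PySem

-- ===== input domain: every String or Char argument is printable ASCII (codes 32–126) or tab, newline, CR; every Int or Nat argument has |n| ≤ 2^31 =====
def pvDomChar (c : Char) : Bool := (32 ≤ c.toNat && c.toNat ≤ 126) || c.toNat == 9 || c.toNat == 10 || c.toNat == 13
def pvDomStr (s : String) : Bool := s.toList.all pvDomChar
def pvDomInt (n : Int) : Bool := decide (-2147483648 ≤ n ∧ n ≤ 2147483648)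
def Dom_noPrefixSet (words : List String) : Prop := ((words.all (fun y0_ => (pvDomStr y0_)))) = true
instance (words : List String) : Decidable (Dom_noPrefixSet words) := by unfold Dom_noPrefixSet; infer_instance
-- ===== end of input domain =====

-- B replaces A's trie construction by a plain scan of earlier words with two prefix tests (simpler; same result, quadratic instead of trie-indexed).

-- ===== PORT A =====
-- A's nested Python dicts become a trie: a node is an end-marker flag ('_end_' key) plus
-- an insertion-ordered child list (a mutual pair, since nested inductives are not allowed).
mutual
inductive PTrie : Type
  | mk : Bool → PChildren → PTrie
  deriving DecidableEq, Repr
inductive PChildren : Type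
  | nil : PChildren
  | cons : Char → PTrie → PChildren → PChildren
  deriving DecidableEq, Repr
end

def PChildren.isNil : PChildren → Bool
  | .nil => true
  | .cons _ _ _ => false

-- A's inner letter loop (mutation of the trie is threaded functionally; `none` = early `return False, word`).
mutual
def insT : PTrie → List Char → Option PTrie
  | .mk b c, [] => if b || !c.isNil then none else some (.mk true c)
  | .mk b c, l :: ls => if b then none else Option.map (fun c' => PTrie.mk b c') (insC c l ls)
  termination_by _t w => (w.length, 0)
  decreasing_by all_goals (simp_wf; omega)
def insC : PChildren → Char → List Char → Option PChildren
  | .nil, l, ls => Option.map (fun t => PChildren.cons l t .nil) (insT (.mk false .nil) ls)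
  | .cons a t rest, l, ls =>
      if a = l then Option.map (fun t' => PChildren.cons a t' rest) (insT t ls)
      else Option.map (fun rest' => PChildren.cons a t rest') (insC rest l ls)
  termination_by c _l ls => (ls.length, 1 + sizeOf c)
  decreasing_by all_goals (simp_wf; omega)
end

def noPrefixSetLoop : PTrie → List String → Bool × Option String
  | _, [] => (true, none)
  | t, w :: ws =>
      match insT t w.toList with
      | none => (false, some w)
      | some t' => noPrefixSetLoop t' ws

def noPrefixSet (words : List String) : Bool × Option String :=
  noPrefixSetLoop (.mk false .nil) words

-- ===== PORT B =====
def altLoop (seen : List String) : List String → Bool × Option String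
  | [] => (true, none)
  | w :: ws =>
      if seen.any (fun e => PySem.Str.startswith w e || PySem.Str.startswith e w) then (false, some w)
      else altLoop (seen ++ [w]) ws

def noPrefixSet_alt (words : List String) : Bool × Option String :=
  altLoop [] words

-- ===== PRECONDITION & SPEC =====
def Spec_noPrefixSet (words : List String) (out : Bool × Option String) : Prop := out = noPrefixSet_alt words
instance (words : List String) (out : Bool × Option String) : Decidable (Spec_noPrefixSet words out) := by unfold Spec_noPrefixSet; infer_instance

-- ===== CLAIM (what is proved, stated in full; the proofs are below) =====
def Claim_equal_noPrefixSet : Prop := ∀ (words : List String), Dom_noPrefixSet words → Spec_noPrefixSet words (noPrefixSet words)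

-- ===== LEMMAS AND PROOFS =====

-- The list of words stored in a trie.
mutual
def wordsT : PTrie → List (List Char)
  | .mk b c => (if b then [([] : List Char)] else []) ++ wordsC c
def wordsC : PChildren → List (List Char)
  | .nil => []
  | .cons a t rest => (wordsT t).map (fun e => a :: e) ++ wordsC rest
end

def keysC : PChildren → List Char
  | .nil => []
  | .cons a _ rest => a :: keysC rest

-- Well-formedness of the tries A builds: every child subtree stores a word, keys are distinct.
mutual
def WFT : PTrie → Prop
  | .mk _ c => WFC c
def WFC : PChildren → Prop
  | .nil => True
  | .cons a t rest => WFT t ∧ wordsT t ≠ [] ∧ a ∉ keysC rest ∧ WFC rest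
end

def confl (e w : List Char) : Bool := e.isPrefixOf w || w.isPrefixOf e

def freshT : List Char → PTrie
  | [] => .mk true .nil
  | l :: ls => .mk false (.cons l (freshT ls) .nil)

theorem insT_fresh : ∀ ls, insT (.mk false .nil) ls = some (freshT ls) := by
  intro ls
  induction ls with
  | nil => simp [insT, freshT, PChildren.isNil]
  | cons l ls ih => simp [insT, insC, freshT, ih]

theorem wordsT_fresh : ∀ ls, wordsT (freshT ls) = [ls] := by
  intro ls
  induction ls with
  | nil => simp [freshT, wordsT, wordsC]
  | cons l ls ih => simp [freshT, wordsT, wordsC, ih]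

theorem WFT_fresh : ∀ ls, WFT (freshT ls) := by
  intro ls
  induction ls with
  | nil => simp [freshT, WFT, WFC]
  | cons l ls ih => simp [freshT, WFT, WFC, keysC, wordsT_fresh, ih]

theorem wordsC_ne_nil : ∀ c, WFC c → c ≠ .nil → wordsC c ≠ [] := by
  intro c hwf hne
  cases c with
  | nil => exact absurd rfl hne
  | cons a t rest =>
    obtain ⟨_, hne', _, _⟩ := hwf
    simp [wordsC]
    intro h _
    exact hne' h

theorem confl_nil (e : List Char) : confl e [] = true := by
  simp [confl, List.isPrefixOf]

theorem confl_cons_ne {a l : Char} (e ls : List Char) (h : a ≠ l) :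
    confl (a :: e) (l :: ls) = false := by
  simp [confl, List.isPrefixOf, h, Ne.symm h]

theorem confl_cons_eq (a : Char) (e ls : List Char) :
    confl (a :: e) (a :: ls) = confl e ls := by
  simp [confl, List.isPrefixOf]

theorem wordsC_shape : ∀ (c : PChildren) (e : List Char), e ∈ wordsC c →
    ∃ k e', e = k :: e' ∧ k ∈ keysC c
  | .nil => by intro e he; simp [wordsC] at he
  | .cons a t rest => by
    intro e he
    simp only [wordsC, List.mem_append, List.mem_map] at he
    rcases he with ⟨e', _, rfl⟩ | he
    · exact ⟨a, e', rfl, by simp [keysC]⟩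
    · obtain ⟨k, e', rfl, hk⟩ := wordsC_shape rest e he
      exact ⟨k, e', rfl, by simp [keysC, hk]⟩

-- The children-level half of `ins_main`, by recursion over the child list
-- (the word-level statement for the tail `ls` is taken as hypothesis `ih`).
theorem ins_main_C (l : Char) (ls : List Char)
    (ih : ∀ t : PTrie, WFT t →
      ((insT t ls = none ↔ ∃ e ∈ wordsT t, confl e ls = true) ∧
       (∀ t', insT t ls = some t' → WFT t' ∧ ∀ e, e ∈ wordsT t' ↔ e ∈ wordsT t ∨ e = ls))) :
    ∀ (c : PChildren), WFC c →
      ((insC c l ls = none ↔ ∃ e ∈ wordsC c, confl e (l :: ls) = true) ∧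
       (∀ c', insC c l ls = some c' →
         WFC c' ∧ (∀ e, e ∈ wordsC c' ↔ e ∈ wordsC c ∨ e = l :: ls) ∧
         (∀ k, k ∈ keysC c' ↔ k ∈ keysC c ∨ k = l)))
  | .nil => by
    intro _
    constructor
    · simp [insC, insT_fresh, wordsC]
    · intro c' h
      simp only [insC, insT_fresh, Option.map_some, Option.some.injEq] at h
      subst h
      refine ⟨⟨WFT_fresh ls, by simp [wordsT_fresh], by simp [keysC], trivial⟩, ?_, ?_⟩
      · intro e; simp [wordsC, wordsT_fresh]
      · intro k; simp [keysC]
  | .cons a t rest => by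
    rintro ⟨hwt, hne, hka, hwr⟩
    by_cases hal : a = l
    · subst hal
      have hT := ih t hwt
      constructor
      · constructor
        · intro h
          simp only [insC, if_pos rfl, if_true, Option.map_eq_none_iff] at h
          obtain ⟨e, he, hc⟩ := hT.1.mp h
          exact ⟨a :: e, by simp [wordsC, he], by rwa [confl_cons_eq]⟩
        · rintro ⟨e, he, hc⟩
          simp only [insC, if_pos rfl, if_true, Option.map_eq_none_iff]
          simp only [wordsC, List.mem_append, List.mem_map] at he
          rcases he with ⟨e', he', rfl⟩ | he
          · exact hT.1.mpr ⟨e', he', by rwa [confl_cons_eq] at hc⟩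
          · obtain ⟨k, e'', rfl, hk⟩ := wordsC_shape rest _ he
            have hkne : k ≠ a := fun hh => hka (hh ▸ hk)
            rw [confl_cons_ne _ _ hkne] at hc
            exact absurd hc (by simp)
      · intro c' h
        simp only [insC, if_pos rfl, if_true, Option.map_eq_some_iff] at h
        obtain ⟨t', ht', rfl⟩ := h
        obtain ⟨hwt', hmem⟩ := hT.2 t' ht'
        have hne' : wordsT t' ≠ [] :=
          List.ne_nil_of_mem ((hmem ls).mpr (Or.inr rfl))
        refine ⟨⟨hwt', hne', hka, hwr⟩, ?_, ?_⟩
        · intro e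
          simp only [wordsC, List.mem_append, List.mem_map]
          constructor
          · rintro (⟨e', he', rfl⟩ | he)
            · rcases (hmem e').mp he' with he' | rfl
              · exact Or.inl (Or.inl ⟨e', he', rfl⟩)
              · exact Or.inr rfl
            · exact Or.inl (Or.inr he)
          · rintro ((⟨e', he', rfl⟩ | he) | rfl)
            · exact Or.inl ⟨e', (hmem e').mpr (Or.inl he'), rfl⟩
            · exact Or.inr he
            · exact Or.inl ⟨ls, (hmem ls).mpr (Or.inr rfl), rfl⟩
        · intro k
          simp only [keysC, List.mem_cons]
          tauto
    · have hR := ins_main_C l ls ih rest hwr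
      constructor
      · constructor
        · intro h
          simp only [insC, if_neg hal, Option.map_eq_none_iff] at h
          obtain ⟨e, he, hc⟩ := hR.1.mp h
          exact ⟨e, by simp [wordsC, he], hc⟩
        · rintro ⟨e, he, hc⟩
          simp only [insC, if_neg hal, Option.map_eq_none_iff]
          simp only [wordsC, List.mem_append, List.mem_map] at he
          rcases he with ⟨e', he', rfl⟩ | he
          · rw [confl_cons_ne _ _ hal] at hc
            exact absurd hc (by simp)
          · exact hR.1.mpr ⟨e, he, hc⟩
      · intro c' h
        simp only [insC, if_neg hal, Option.map_eq_some_iff] at h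
        obtain ⟨rest', hrest', rfl⟩ := h
        obtain ⟨hwr', hmem, hkeys⟩ := hR.2 rest' hrest'
        have hka' : a ∉ keysC rest' := by
          intro hk
          rcases (hkeys a).mp hk with hk | hk
          · exact hka hk
          · exact hal hk
        refine ⟨⟨hwt, hne, hka', hwr'⟩, ?_, ?_⟩
        · intro e
          simp only [wordsC, List.mem_append, List.mem_map, hmem e]
          exact or_assoc.symm
        · intro k
          simp only [keysC, List.mem_cons, hkeys k]
          exact or_assoc.symm

theorem ins_main : ∀ (ls : List Char) (t : PTrie), WFT t →
    ((insT t ls = none ↔ ∃ e ∈ wordsT t, confl e ls = true) ∧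
     (∀ t', insT t ls = some t' → WFT t' ∧ ∀ e, e ∈ wordsT t' ↔ e ∈ wordsT t ∨ e = ls)) := by
  intro ls
  induction ls with
  | nil =>
    intro t hwf
    obtain ⟨b, c⟩ := t
    constructor
    · constructor
      · intro h
        simp only [insT] at h
        split_ifs at h with hc
        rcases Bool.or_eq_true_iff.mp hc with hb | hnil
        · exact ⟨[], by simp [wordsT, hb], confl_nil []⟩
        · have hcne : c ≠ .nil := by
            intro hh; subst hh; simp [PChildren.isNil] at hnil
          obtain ⟨e, he⟩ := List.exists_mem_of_ne_nil _ (wordsC_ne_nil c (by exact hwf) hcne)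
          exact ⟨e, by simp [wordsT, he], confl_nil e⟩
      · rintro ⟨e, he, -⟩
        simp only [insT]
        rw [if_pos]
        simp only [wordsT, List.mem_append] at he
        rcases he with he | he
        · have hb : b = true := by by_contra hb; simp [hb] at he
          simp [hb]
        · have hcne : c ≠ .nil := by
            intro hh; subst hh; simp [wordsC] at he
          have : c.isNil = false := by cases c <;> simp [PChildren.isNil] at hcne ⊢
          simp [this]
    · intro t' h
      simp only [insT] at h
      split_ifs at h with hc
      simp only [Option.some.injEq] at h
      subst h
      have hb : b = false := by
        by_contra hb
        simp [Bool.of_not_eq_false hb] at hc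
      have hcnil : c = .nil := by
        cases c with
        | nil => rfl
        | cons a t rest => simp [PChildren.isNil, hb] at hc
      subst hcnil hb
      refine ⟨by simp [WFT, WFC], ?_⟩
      intro e
      simp [wordsT, wordsC]
  | cons l ls ih =>
    intro t hwf
    obtain ⟨b, c⟩ := t
    by_cases hb : b = true
    · subst hb
      constructor
      · exact iff_of_true (by simp [insT])
          ⟨[], by simp [wordsT], by simp [confl, List.isPrefixOf]⟩
      · intro t' h
        rw [show insT (.mk true c) (l :: ls) = none from by simp [insT]] at h
        cases h
    · have hb' : b = false := Bool.of_not_eq_true hb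
      subst hb'
      have hwc : WFC c := hwf
      have hQ := ins_main_C l ls ih c hwc
      have hunf : insT (.mk false c) (l :: ls) =
          Option.map (fun c' => PTrie.mk false c') (insC c l ls) := by
        simp [insT]
      constructor
      · rw [hunf, Option.map_eq_none_iff, hQ.1]
        simp [wordsT]
      · intro t' h
        rw [hunf, Option.map_eq_some_iff] at h
        obtain ⟨c', hc', rfl⟩ := h
        obtain ⟨hwc', hmem, -⟩ := hQ.2 c' hc'
        refine ⟨hwc', ?_⟩
        intro e
        have := hmem e
        simpa [wordsT] using this

theorem loop_eq : ∀ (ws : List String) (t : PTrie) (seen : List String), WFT t →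
    (∀ e, e ∈ wordsT t ↔ ∃ s ∈ seen, s.toList = e) →
    noPrefixSetLoop t ws = altLoop seen ws := by
  intro ws
  induction ws with
  | nil => intro t seen _ _; simp [noPrefixSetLoop, altLoop]
  | cons w ws ihw =>
    intro t seen hwf hinv
    have hmain := ins_main w.toList t hwf
    have hconv : ∀ s : String,
        (PySem.Str.startswith w s || PySem.Str.startswith s w) = confl s.toList w.toList := by
      intro s
      rw [Bool.eq_iff_iff]
      simp only [Bool.or_eq_true, confl, PySem.Str.startswith_eq,
        PySem.Chars.startswith_iff, List.isPrefixOf_iff_prefix]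
    have hcond : insT t w.toList = none ↔
        (seen.any (fun e => PySem.Str.startswith w e || PySem.Str.startswith e w)) = true := by
      rw [hmain.1]
      simp only [List.any_eq_true, hconv]
      constructor
      · rintro ⟨e, he, hc⟩
        obtain ⟨s, hs, rfl⟩ := (hinv e).mp he
        exact ⟨s, hs, hc⟩
      · rintro ⟨s, hs, hc⟩
        exact ⟨s.toList, (hinv s.toList).mpr ⟨s, hs, rfl⟩, hc⟩
    cases hins : insT t w.toList with
    | none =>
      have : (seen.any (fun e => PySem.Str.startswith w e || PySem.Str.startswith e w)) = true :=
        hcond.mp hins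
      simp only [noPrefixSetLoop, altLoop, hins, this, if_true]
    | some t' =>
      have hfalse :
          (seen.any (fun e => PySem.Str.startswith w e || PySem.Str.startswith e w)) = false := by
        rw [Bool.eq_false_iff]
        intro hh
        rw [← hcond] at hh
        rw [hins] at hh
        cases hh
      obtain ⟨hwf', hmem⟩ := hmain.2 t' hins
      have hinv' : ∀ e, e ∈ wordsT t' ↔ ∃ s ∈ seen ++ [w], s.toList = e := by
        intro e
        rw [hmem e, hinv e]
        simp only [List.mem_append, List.mem_singleton]
        constructor
        · rintro (⟨s, hs, rfl⟩ | rfl)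
          · exact ⟨s, Or.inl hs, rfl⟩
          · exact ⟨w, Or.inr rfl, rfl⟩
        · rintro ⟨s, hs | rfl, rfl⟩
          · exact Or.inl ⟨s, hs, rfl⟩
          · exact Or.inr rfl
      simp only [noPrefixSetLoop, altLoop, hins, hfalse, Bool.false_eq_true, if_false]
      exact ihw t' (seen ++ [w]) hwf' hinv'

-- ===== VERDICT (by name: the statement is the Claim_ definition above) =====
theorem noPrefixSet_spec : Claim_equal_noPrefixSet := by
  intro words _
  unfold Spec_noPrefixSet noPrefixSet noPrefixSet_alt
  exact loop_eq words (.mk false .nil) [] (by simp [WFT, WFC]) (by simp [wordsT, wordsC])
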